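-- pv_equiv track=rewrite | github.com/vnasta/kiren-chess-dashboard | regular_rating_cache.py | extract_title_from_name
-- ===== SOURCE A (Python) =====
-- from typing import Dict, List, Optional
--
-- def extract_title_from_name(name: str) -> tuple[str, Optional[str]]:
--     """Extract chess title from opponent name"""
--     titles = ['GM', 'IM', 'FM', 'WGM', 'WIM', 'WFM', 'EXPERT', 'MASTER']
--
--     name_upper = name.upper()
--     for title in titles:
--         if name_upper.startswith(title + ' '):
--             clean_name = name[len(title):].strip()
--             return clean_name, title
--
--     return name, None
-- ===== SOURCE B (Python) =====
-- # B: tokenize once (partition at the first space) + one set lookup, instead of scanning 8 prefixes with startswith.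
-- _TITLES = {'GM', 'IM', 'FM', 'WGM', 'WIM', 'WFM', 'EXPERT', 'MASTER'}
--
-- def extract_title_from_name(name: str):
--     head, sep, _rest = name.upper().partition(' ')
--     if sep and head in _TITLES:
--         return name[len(head):].strip(), head
--     return name, None
-- ===== Notes on version B (the rewrite author's own statement) =====
-- stated objective: idiomatic
-- what changed: Instead of looping over the eight titles testing name.upper().startswith of each title followed by a space, B tokenizes once with a single partition at the first space character and does a single set-membership lookup on the first token.
import Mathlib
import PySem

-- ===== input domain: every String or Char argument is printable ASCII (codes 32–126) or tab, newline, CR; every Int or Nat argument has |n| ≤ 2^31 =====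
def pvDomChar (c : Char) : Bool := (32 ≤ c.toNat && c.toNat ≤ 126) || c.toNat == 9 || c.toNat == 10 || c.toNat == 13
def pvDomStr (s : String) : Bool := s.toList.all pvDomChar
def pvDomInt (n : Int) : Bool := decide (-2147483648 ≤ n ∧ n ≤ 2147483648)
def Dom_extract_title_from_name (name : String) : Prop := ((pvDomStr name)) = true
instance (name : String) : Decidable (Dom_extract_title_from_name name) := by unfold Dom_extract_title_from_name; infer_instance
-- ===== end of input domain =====

-- B replaces A's eight startswith prefix scans by one tokenize (partition at the first space)
-- plus a single set-membership lookup; objective: idiomatic, same exact return value.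

-- ===== PORT A =====
def pvTitles : List (List Char) :=
  [['G','M'], ['I','M'], ['F','M'], ['W','G','M'], ['W','I','M'], ['W','F','M'],
   ['E','X','P','E','R','T'], ['M','A','S','T','E','R']]

-- the for-loop with early return, as structural recursion over the title list
def pvGoA (name : String) (nameUpper : List Char) : List (List Char) → String × Option String
  | [] => (name, none)
  | t :: ts =>
    if PySem.Chars.startswith nameUpper (t ++ [' ']) then
      (String.ofList (PySem.Chars.strip (PySem.List.slice name.toList (some (t.length : Int)) none)),
       some (String.ofList t))
    else pvGoA name nameUpper ts

def extract_title_from_name (name : String) : String × Option String :=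
  pvGoA name (PySem.Chars.upper name.toList) pvTitles

-- ===== PORT B =====
def pvTitleSet : PySem.Set (List Char) :=
  PySem.Set.ofList
    [['G','M'], ['I','M'], ['F','M'], ['W','G','M'], ['W','I','M'], ['W','F','M'],
     ['E','X','P','E','R','T'], ['M','A','S','T','E','R']]

def extract_title_from_name_alt (name : String) : String × Option String :=
  let u := PySem.Chars.upper name.toList
  -- name.upper() partitioned at the first space: for a single-char separator, head = chars before the first
  -- space, and sep is non-empty iff a space occurs, i.e. head is shorter than u (exact)
  let head := u.takeWhile (· != ' ')
  if head.length < u.length ∧ head ∈ pvTitleSet then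
    (String.ofList (PySem.Chars.strip (PySem.List.slice name.toList (some (head.length : Int)) none)),
     some (String.ofList head))
  else (name, none)

-- ===== PRECONDITION & SPEC =====
def Spec_extract_title_from_name (name : String) (out : String × Option String) : Prop := out = extract_title_from_name_alt name
instance (name : String) (out : String × Option String) : Decidable (Spec_extract_title_from_name name out) := by unfold Spec_extract_title_from_name; infer_instance

-- ===== CLAIM (what is proved, stated in full; the proofs are below) =====
def Claim_equal_extract_title_from_name : Prop := ∀ (name : String), Dom_extract_title_from_name name → Spec_extract_title_from_name name (extract_title_from_name name)

-- ===== LEMMAS AND PROOFS =====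

-- startswith of title-plus-space holds iff the first space-delimited token IS the title and a space occurs
theorem pvKey (t u : List Char) (ht : (' ' : Char) ∉ t) :
    PySem.Chars.startswith u (t ++ [' ']) = true ↔
      (u.takeWhile (· != ' ') = t ∧ (u.takeWhile (· != ' ')).length < u.length) := by
  rw [PySem.Chars.startswith_iff]
  constructor
  · rintro ⟨r, rfl⟩
    have hall : List.takeWhile (· != ' ') t = t := by
      apply List.takeWhile_eq_self_iff.mpr
      intro a ha
      simp only [bne_iff_ne, ne_eq]
      exact fun h => ht (h ▸ ha)
    constructor
    · rw [List.append_assoc]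
      rw [List.takeWhile_append, hall]
      simp
    · rw [List.append_assoc, List.takeWhile_append, hall]
      simp
  · rintro ⟨hh, hlt⟩
    have hsplit := List.takeWhile_append_dropWhile (p := (· != ' ')) (l := u)
    have hne : List.dropWhile (· != ' ') u ≠ [] := by
      intro h
      rw [h, List.append_nil, hh] at hsplit
      rw [hh, ← hsplit] at hlt
      omega
    have hhead := List.head_dropWhile_not (· != ' ') hne
    obtain ⟨c, r, hcr⟩ := List.exists_cons_of_ne_nil hne
    have hc : c = ' ' := by simp [hcr] at hhead; simpa using hhead
    refine ⟨r, ?_⟩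
    calc (t ++ [' ']) ++ r = t ++ ((' ' : Char) :: r) := by simp
      _ = List.takeWhile (· != ' ') u ++ List.dropWhile (· != ' ') u := by rw [hh, hcr, hc]
      _ = u := hsplit

-- Bool form, convenient for rewriting A's branch conditions
theorem pvKeyB (t u : List Char) (ht : (' ' : Char) ∉ t) :
    PySem.Chars.startswith u (t ++ [' ']) =
      (decide (u.takeWhile (· != ' ') = t) && decide ((u.takeWhile (· != ' ')).length < u.length)) := by
  by_cases h : PySem.Chars.startswith u (t ++ [' ']) = true
  · obtain ⟨h1, h2⟩ := (pvKey t u ht).mp h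
    simp [h, h1, h1 ▸ h2]
  · have hf : PySem.Chars.startswith u (t ++ [' ']) = false := by simpa using h
    rw [hf]
    by_cases hh : u.takeWhile (· != ' ') = t
    · have hnl : ¬ (u.takeWhile (· != ' ')).length < u.length :=
        fun hlt => h ((pvKey t u ht).mpr ⟨hh, hlt⟩)
      rw [hh] at hnl
      simp [hh, hnl]
    · simp [hh]

theorem extract_title_from_name_eq (name : String) :
    extract_title_from_name name = extract_title_from_name_alt name := by
  unfold extract_title_from_name extract_title_from_name_alt
  set u := PySem.Chars.upper name.toList with hu
  simp only [pvTitles, pvTitleSet, pvGoA]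
  rw [pvKeyB ['G','M'] u (by decide), pvKeyB ['I','M'] u (by decide),
      pvKeyB ['F','M'] u (by decide), pvKeyB ['W','G','M'] u (by decide),
      pvKeyB ['W','I','M'] u (by decide), pvKeyB ['W','F','M'] u (by decide),
      pvKeyB ['E','X','P','E','R','T'] u (by decide),
      pvKeyB ['M','A','S','T','E','R'] u (by decide)]
  set hd := u.takeWhile (· != ' ') with hhd
  by_cases hlen : hd.length < u.length
  · simp only [hlen, decide_true, Bool.and_true]
    by_cases g1 : hd = ['G','M']
    · simp [g1, PySem.Set.mem_ofList]
    · by_cases g2 : hd = ['I','M']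
      · simp [g2, PySem.Set.mem_ofList]
      · by_cases g3 : hd = ['F','M']
        · simp [g3, PySem.Set.mem_ofList]
        · by_cases g4 : hd = ['W','G','M']
          · simp [g4, PySem.Set.mem_ofList]
          · by_cases g5 : hd = ['W','I','M']
            · simp [g5, PySem.Set.mem_ofList]
            · by_cases g6 : hd = ['W','F','M']
              · simp [g6, PySem.Set.mem_ofList]
              · by_cases g7 : hd = ['E','X','P','E','R','T']
                · simp [g7, PySem.Set.mem_ofList]
                · by_cases g8 : hd = ['M','A','S','T','E','R']
                  · simp [g8, PySem.Set.mem_ofList]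
                  · simp [g1, g2, g3, g4, g5, g6, g7, g8, PySem.Set.mem_ofList]
  · simp [hlen, PySem.Set.mem_ofList]

-- ===== VERDICT (by name: the statement is the Claim_ definition above) =====
theorem extract_title_from_name_spec : Claim_equal_extract_title_from_name := by
  intro name _
  unfold Spec_extract_title_from_name
  exact extract_title_from_name_eq name
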